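-- pv_equiv track=rewrite | github.com/RosanaRufer/Katas_in_Python | bowling/bowling.py | score_for
-- ===== SOURCE A (Python) =====
-- STRIKE = 'X'
--
-- SPARE = '/'
--
-- def score_for(all_rolls: str):
--     """
--     Given valid a set of bowling frames
--     It returns the total accumulated score
--     :param all_rolls: string
--     :return: int
--     """
--     frames = all_rolls.split('|')
--     total_score = 0
--
--     for index, frame in enumerate(frames):
--
--         current_frame_score = score_for_frame(frame)
--
--         next_frame = get_next_frame(frames, index)
--         if (STRIKE in frame) and next_frame:
--             current_frame_score = current_frame_score + score_for_frame(next_frame)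
--         if (SPARE in frame) and next_frame:
--             current_frame_score = current_frame_score + score_for_first_roll(next_frame)
--
--         total_score = total_score + current_frame_score
--
--     return total_score
--
-- def get_next_frame(frames: [str], current_index: int):
--     """ If next frame exists, returns next frame, else returns False """
--     frame = False
--     try:
--         frame = frames[current_index + 1]
--     except IndexError:
--         pass
--
--     return frame
--
-- def score_for_first_roll(frame: str):
--     """ Returns the points of the first roll in a frame """
--     first_roll = frame[0]
--     if first_roll in [STRIKE, SPARE]:
--         return 10
--     else:
--         return int(first_roll)
--
-- def score_for_frame(frame: str):
--     """ Returns the points obtained in a frame """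
--     if SPARE in frame or STRIKE in frame:
--         return 10
--     else:
--         numbers = [int(n) for n in list(frame)]
--         return sum(numbers)
-- ===== SOURCE B (Python) =====
-- STRIKE = 'X'
--
-- SPARE = '/'
--
-- def score_for(all_rolls: str):
--     """Divide-and-conquer scoring: split the frame list in halves, score each half,
--     and stitch the halves together with the bonus across the single adjacent pair."""
--     frames = all_rolls.split('|')
--     return _score_seg(frames)[0]
--
-- def _score_seg(frames):
--     """Score of a non-empty frame segment, plus its first and last frame."""
--     if len(frames) == 1:
--         f = frames[0]
--         return (frame_score(f), f, f)
--     mid = len(frames) // 2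
--     sl, first_l, last_l = _score_seg(frames[:mid])
--     sr, first_r, last_r = _score_seg(frames[mid:])
--     return (sl + sr + _bonus(last_l, first_r), first_l, last_r)
--
-- def _bonus(cur, nxt):
--     """Bonus earned by frame `cur` from the frame `nxt` immediately after it."""
--     b = 0
--     if nxt:
--         if STRIKE in cur:
--             b += frame_score(nxt)
--         if SPARE in cur:
--             b += first_roll_score(nxt)
--     return b
--
-- def frame_score(f):
--     if STRIKE in f or SPARE in f:
--         return 10
--     return sum(int(c) for c in f)
--
-- def first_roll_score(f):
--     c = f[0]
--     return 10 if c in (STRIKE, SPARE) else int(c)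
-- ===== Notes on version B (the rewrite author's own statement) =====
-- stated objective: alternative
-- what changed: Replaced A's single indexed loop with try/except next-frame lookup by a divide-and-conquer recursion: each half of the frame list is scored independently (returning score, first and last frame) and the halves are merged by adding the bonus of the one adjacent pair across the split.
import Mathlib
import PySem

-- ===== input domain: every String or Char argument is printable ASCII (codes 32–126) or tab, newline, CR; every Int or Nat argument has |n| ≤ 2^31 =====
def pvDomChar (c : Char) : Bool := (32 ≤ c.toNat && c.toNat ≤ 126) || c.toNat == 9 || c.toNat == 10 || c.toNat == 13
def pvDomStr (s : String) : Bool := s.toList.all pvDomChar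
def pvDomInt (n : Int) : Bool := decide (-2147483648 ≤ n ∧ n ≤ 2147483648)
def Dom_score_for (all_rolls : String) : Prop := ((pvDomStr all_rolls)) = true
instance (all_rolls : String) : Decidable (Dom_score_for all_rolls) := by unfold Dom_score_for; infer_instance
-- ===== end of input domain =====

-- B replaces A's single indexed loop (try/except lookup of the next frame) by a
-- divide-and-conquer recursion on the frame list: halves are scored independently and
-- merged with the bonus of the one adjacent pair across the split; same scoring semantics.

-- shared by both ports and Pre_: all_rolls.split('|').  split? returns none only for an empty
-- separator, so the .getD [] arm is unreachable here.
def pvFrames (s : String) : List String := (PySem.Str.split? s "|").getD []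

-- ===== PORT A =====
-- score_for_frame: 10 on a spare/strike frame, else the sum of int(c) over the chars.
-- int(c) is ported as (PySem.Int.ofChars? [c]).getD 0; the .getD 0 arm is Python's ValueError,
-- excluded by Pre_score_for.
def pvA_score_for_frame (frame : String) : Int :=
  if PySem.Str.isIn "/" frame || PySem.Str.isIn "X" frame then 10
  else (frame.toList.map (fun n => (PySem.Int.ofChars? [n]).getD 0)).sum

-- score_for_first_roll: frame[0]; the none arm is Python's IndexError (unreachable: A only
-- calls this on a non-empty frame).
def pvA_score_for_first_roll (frame : String) : Int :=
  match PySem.Str.pyGet? frame 0 with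
  | none => 0
  | some c => if c = 'X' ∨ c = '/' then 10 else (PySem.Int.ofChars? [c]).getD 0

-- get_next_frame: Python returns the frame or False; modelled as Option String (none = False).
def pvA_get_next_frame (frames : List String) (current_index : Nat) : Option String :=
  frames[current_index + 1]?

-- Python truthiness of get_next_frame's result: a (present) non-empty string.
def pvA_truthy : Option String → Bool
  | some f => f ≠ ""
  | none => false

-- the `for index, frame in enumerate(frames)` loop: remaining frames + running index + total.
-- (nf.getD "" is only read when pvA_truthy nf, i.e. nf = some of a non-empty frame.)
def pvA_loop (frames : List String) : List String → Nat → Int → Int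
  | [], _, total => total
  | frame :: rest, index, total =>
    let cfs := pvA_score_for_frame frame
    let nf := pvA_get_next_frame frames index
    let cfs := if PySem.Str.isIn "X" frame && pvA_truthy nf then
                 cfs + pvA_score_for_frame (nf.getD "") else cfs
    let cfs := if PySem.Str.isIn "/" frame && pvA_truthy nf then
                 cfs + pvA_score_for_first_roll (nf.getD "") else cfs
    pvA_loop frames rest (index + 1) (total + cfs)

def score_for (all_rolls : String) : Int :=
  let frames := pvFrames all_rolls
  pvA_loop frames frames 0 0

-- ===== PORT B =====
def pvB_frame_score (f : String) : Int :=
  if PySem.Str.isIn "X" f || PySem.Str.isIn "/" f then 10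
  else (f.toList.map (fun c => (PySem.Int.ofChars? [c]).getD 0)).sum

def pvB_first_roll_score (f : String) : Int :=
  match PySem.Str.pyGet? f 0 with
  | none => 0
  | some c => if c = 'X' ∨ c = '/' then 10 else (PySem.Int.ofChars? [c]).getD 0

-- bonus earned by `cur` from the frame `nxt` immediately after it (nxt truthy = non-empty)
def pvB_bonus (cur nxt : String) : Int :=
  if nxt ≠ "" then
    (if PySem.Str.isIn "X" cur then pvB_frame_score nxt else 0)
    + (if PySem.Str.isIn "/" cur then pvB_first_roll_score nxt else 0)
  else 0

-- _score_seg: (score of the segment, its first frame, its last frame); called on non-empty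
-- segments only (the [] arm is unreachable: Python's split yields at least one frame).
def pvB_score_seg : List String → Int × String × String
  | [] => (0, "", "")
  | [f] => (pvB_frame_score f, f, f)
  | a :: b :: rest =>
    let mid := (a :: b :: rest).length / 2
    let l := pvB_score_seg ((a :: b :: rest).take mid)
    let r := pvB_score_seg ((a :: b :: rest).drop mid)
    (l.1 + r.1 + pvB_bonus l.2.2 r.2.1, l.2.1, r.2.2)
termination_by fs => fs.length
decreasing_by
  · simp only [List.length_take, List.length_cons]; omega
  · simp only [List.length_drop, List.length_cons]; omega

def score_for_alt (all_rolls : String) : Int :=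
  (pvB_score_seg (pvFrames all_rolls)).1

-- ===== PRECONDITION & SPEC =====
-- Pre_ excludes exactly the inputs on which A (and B alike) raises ValueError from int():
-- a frame with a non-digit char and no 'X'/'/', or a spare frame whose non-empty successor
-- starts with a char that is not a digit, 'X' or '/'.
def Pre_score_for (all_rolls : String) : Prop :=
  (∀ f ∈ pvFrames all_rolls,
     PySem.Str.isIn "X" f = true ∨ PySem.Str.isIn "/" f = true ∨
       f.toList.all PySem.Chars.isdigit = true) ∧
  (∀ p ∈ (pvFrames all_rolls).zip (pvFrames all_rolls).tail,
     PySem.Str.isIn "/" p.1 = true →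
       (p.2.toList.take 1).all (fun c => PySem.Chars.isdigit c || c == 'X' || c == '/') = true)
instance (all_rolls : String) : Decidable (Pre_score_for all_rolls) := by
  unfold Pre_score_for; infer_instance

def pvWitness_score_for : String := "X|5/|44"

def Spec_score_for (all_rolls : String) (out : Int) : Prop := out = score_for_alt all_rolls
instance (all_rolls : String) (out : Int) : Decidable (Spec_score_for all_rolls out) := by
  unfold Spec_score_for; infer_instance

-- ===== CLAIM (what is proved, stated in full; the proofs are below) =====
def Claim_equal_score_for : Prop := ∀ (all_rolls : String), Dom_score_for all_rolls → Pre_score_for all_rolls → Spec_score_for all_rolls (score_for all_rolls)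

-- ===== LEMMAS AND PROOFS =====

-- reference value: base sum of frame scores + bonus sum over adjacent pairs
def pvS (fs : List String) : Int :=
  (fs.map pvB_frame_score).sum + ((fs.zip fs.tail).map (fun p => pvB_bonus p.1 p.2)).sum

theorem pvAB_frame_score_eq (f : String) : pvA_score_for_frame f = pvB_frame_score f := by
  simp [pvA_score_for_frame, pvB_frame_score, Bool.or_comm]

theorem pvAB_first_roll_eq (f : String) :
    pvA_score_for_first_roll f = pvB_first_roll_score f := rfl

-- one loop iteration, written out (definitional)
theorem pvA_loop_cons (frames : List String) (f : String) (rest : List String)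
    (i : Nat) (total : Int) :
    pvA_loop frames (f :: rest) i total =
      pvA_loop frames rest (i + 1)
        (total +
          (let cfs := pvA_score_for_frame f
           let nf := pvA_get_next_frame frames i
           let cfs := if PySem.Str.isIn "X" f && pvA_truthy nf then
                        cfs + pvA_score_for_frame (nf.getD "") else cfs
           if PySem.Str.isIn "/" f && pvA_truthy nf then
             cfs + pvA_score_for_first_roll (nf.getD "") else cfs)) := rfl

-- the iteration body when no next frame exists
theorem pvA_contrib_none (frames : List String) (i : Nat) (f : String)
    (h : frames[i + 1]? = none) :
    (let cfs := pvA_score_for_frame f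
     let nf := pvA_get_next_frame frames i
     let cfs := if PySem.Str.isIn "X" f && pvA_truthy nf then
                  cfs + pvA_score_for_frame (nf.getD "") else cfs
     if PySem.Str.isIn "/" f && pvA_truthy nf then
       cfs + pvA_score_for_first_roll (nf.getD "") else cfs) = pvB_frame_score f := by
  simp [pvA_get_next_frame, h, pvA_truthy, pvAB_frame_score_eq]

-- the iteration body when the next frame is g
theorem pvA_contrib_some (frames : List String) (i : Nat) (f g : String)
    (h : frames[i + 1]? = some g) :
    (let cfs := pvA_score_for_frame f
     let nf := pvA_get_next_frame frames i
     let cfs := if PySem.Str.isIn "X" f && pvA_truthy nf then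
                  cfs + pvA_score_for_frame (nf.getD "") else cfs
     if PySem.Str.isIn "/" f && pvA_truthy nf then
       cfs + pvA_score_for_first_roll (nf.getD "") else cfs)
      = pvB_frame_score f + pvB_bonus f g := by
  simp only [pvA_get_next_frame, h, pvA_truthy, Option.getD, pvB_bonus,
    pvAB_frame_score_eq, pvAB_first_roll_eq]
  by_cases hg : g = ""
  · simp [hg]
  · simp only [hg, ne_eq, not_false_eq_true, decide_true,
      Bool.and_true, if_pos]
    split_ifs <;> ring

theorem pvA_loop_eq (frames : List String) :
    ∀ (rest : List String) (i : Nat) (total : Int), rest = frames.drop i →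
      pvA_loop frames rest i total = total + pvS rest := by
  intro rest
  induction rest with
  | nil => intro i total _; simp [pvA_loop, pvS]
  | cons f rs ih =>
    intro i total hdrop
    have hrs : rs = frames.drop (i + 1) := by
      have := congrArg List.tail hdrop
      simpa [List.tail_drop] using this
    have hnext : frames[i + 1]? = rs.head? := by
      rw [← List.head?_drop, ← hrs]
    rw [pvA_loop_cons, ih (i + 1) _ hrs]
    cases rs with
    | nil =>
      rw [pvA_contrib_none frames i f (by simpa using hnext)]
      simp [pvS]
    | cons g rs' =>
      rw [pvA_contrib_some frames i f g (by simpa using hnext)]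
      simp [pvS, List.zip_cons_cons]
      ring

-- pvS over a cons with a known head of the tail
theorem pvS_cons (f g : String) (rs : List String) :
    pvS (f :: g :: rs) = pvB_frame_score f + pvB_bonus f g + pvS (g :: rs) := by
  simp [pvS, List.zip_cons_cons]; ring

-- pvS splits over an append of two non-empty segments, paying the cross-pair bonus
theorem pvS_append (L R : List String) (hL : L ≠ []) (hR : R ≠ []) :
    pvS (L ++ R) = pvS L + pvS R + pvB_bonus (L.getLastD "") (R.headD "") := by
  induction L with
  | nil => exact absurd rfl hL
  | cons f L' ih =>
    cases L' with
    | nil =>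
      cases R with
      | nil => exact absurd rfl hR
      | cons g R' =>
        rw [show (([f] : List String) ++ g :: R') = f :: g :: R' from rfl, pvS_cons]
        simp [pvS]; ring
    | cons f2 L'' =>
      rw [show ((f :: f2 :: L'') ++ R) = f :: ((f2 :: L'') ++ R) from rfl]
      have h2 : (f2 :: L'') ++ R = f2 :: (L'' ++ R) := rfl
      rw [h2, pvS_cons, ← h2, ih (by simp)]
      rw [pvS_cons]
      have hgl : (f :: f2 :: L'').getLastD "" = (f2 :: L'').getLastD "" := by
        simp
      rw [hgl]
      ring

-- characterisation of the divide-and-conquer recursion on non-empty segments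
theorem pvB_score_seg_eq : ∀ (fs : List String), fs ≠ [] →
    pvB_score_seg fs = (pvS fs, fs.headD "", fs.getLastD "") := by
  intro fs
  induction fs using pvB_score_seg.induct with
  | case1 => intro h; exact absurd rfl h
  | case2 f => intro _; simp [pvB_score_seg, pvS]
  | case3 a b rest mid ihl ihr =>
    intro _
    rw [pvB_score_seg]
    have hTake : (a :: b :: rest).take ((a :: b :: rest).length / 2) ≠ [] := by
      intro h
      have := congrArg List.length h
      simp only [List.length_take, List.length_cons, List.length_nil] at this
      omega
    have hDrop : (a :: b :: rest).drop ((a :: b :: rest).length / 2) ≠ [] := by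
      intro h
      have := congrArg List.length h
      simp only [List.length_drop, List.length_cons, List.length_nil] at this
      omega
    rw [ihl hTake, ihr hDrop]
    have happ : (a :: b :: rest).take ((a :: b :: rest).length / 2) ++
        (a :: b :: rest).drop ((a :: b :: rest).length / 2) = a :: b :: rest :=
      List.take_append_drop _ _
    have hsum := pvS_append _ _ hTake hDrop
    rw [happ] at hsum
    have hhead : ((a :: b :: rest).take ((a :: b :: rest).length / 2)).headD "" = a := by
      have h2 : (a :: b :: rest).length / 2 = rest.length / 2 + 1 := by
        simp only [List.length_cons]; omega
      rw [h2]
      rfl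
    have hlast : ((a :: b :: rest).drop ((a :: b :: rest).length / 2)).getLastD "" =
        (a :: b :: rest).getLastD "" := by
      rw [List.getLastD_eq_getLast?, List.getLastD_eq_getLast?]
      conv_rhs => rw [← happ]
      rw [List.getLast?_append_of_ne_nil _ hDrop]
    refine Prod.ext ?_ (Prod.ext ?_ ?_)
    · rw [hsum]
    · rw [hhead]; rfl
    · rw [hlast]

-- ===== VERDICT (by name: the statement is the Claim_ definition above) =====
theorem score_for_spec : Claim_equal_score_for := by
  intro all_rolls _ _
  unfold Spec_score_for score_for score_for_alt
  cases h : pvFrames all_rolls with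
  | nil =>
    show pvA_loop [] [] 0 0 = (pvB_score_seg []).1
    simp [pvA_loop, pvB_score_seg]
  | cons f fs =>
    show pvA_loop (f :: fs) (f :: fs) 0 0 = (pvB_score_seg (f :: fs)).1
    rw [pvA_loop_eq (f :: fs) (f :: fs) 0 0 rfl,
        pvB_score_seg_eq (f :: fs) (by simp)]
    ring
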